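-- pv_equiv track=rewrite | github.com/depixusgenome/trackanalysis | src/assemble/piecewise.py | find_cyclicsubs
-- ===== SOURCE A (Python) =====
-- from typing import List, Tuple, Dict, Generator # pylint: disable=unused-import
--
-- def find_cyclicsubs(perm:Tuple[int, ...]):
--     u'find sub-kpermutations within the permutation'
--     # compute the new positions for each sub-kperm
--     srtprm=sorted(perm)
--     subkprms=[]
--     for val in srtprm:
--         kpr=[val]
--         if perm[srtprm.index(val)]==kpr[0]:
--             subkprms.append(tuple(kpr))
--             continue
--         kpr.append(perm[srtprm.index(val)])
--         while kpr[-1]!=kpr[0]: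
--             kpr.append(perm[srtprm.index(kpr[-1])])
--
--         subkprms.append(tuple(kpr[:-1]))
--
--     return list(set(subkprms))
-- ===== SOURCE B (Python) =====
-- def find_cyclicsubs(perm):
--     'find sub-kpermutations within the permutation'
--     srtprm = sorted(perm)
--     rank = {}
--     for i, v in enumerate(srtprm):
--         if v not in rank:
--             rank[v] = i
--     rot = {}
--     visited = set()
--     for v in srtprm:
--         if v in visited:
--             continue
--         cyc = [v]
--         nxt = perm[rank[v]]
--         while nxt != v:
--             cyc.append(nxt)
--             nxt = perm[rank[nxt]]
--         for i, c in enumerate(cyc):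
--             visited.add(c)
--             rot[c] = tuple(cyc[i:] + cyc[:i])
--     subkprms = [rot[val] for val in srtprm]
--     return list(set(subkprms))
-- ===== Notes on version B (the rewrite author's own statement) =====
-- stated objective: alternative
-- what changed: A re-traces a cycle from scratch for every element of the sorted list, with an O(n) list.index scan at each step; B builds a first-occurrence value-to-rank dictionary once, decomposes the permutation into cycles a single time under a visited set, and emits each member's tuple as a rotation (slice) of its cycle.
import Mathlib
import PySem

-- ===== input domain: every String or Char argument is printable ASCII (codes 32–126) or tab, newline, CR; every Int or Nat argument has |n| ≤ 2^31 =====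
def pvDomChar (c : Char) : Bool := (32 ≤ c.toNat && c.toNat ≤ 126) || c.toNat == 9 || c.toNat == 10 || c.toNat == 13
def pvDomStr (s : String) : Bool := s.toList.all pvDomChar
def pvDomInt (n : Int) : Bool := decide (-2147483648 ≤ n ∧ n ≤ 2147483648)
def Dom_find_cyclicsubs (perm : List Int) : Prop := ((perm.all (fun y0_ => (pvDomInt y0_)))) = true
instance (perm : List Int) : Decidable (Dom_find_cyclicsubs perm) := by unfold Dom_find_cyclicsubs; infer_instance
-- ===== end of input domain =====

-- B replaces A's per-element retracing (a list.index scan inside a while loop restarted for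
-- every element of the sorted list) by one cycle decomposition: a first-occurrence rank
-- dictionary, each cycle traced once under a visited set, and the per-member tuples produced
-- as rotations (slices) of the traced cycle.

-- ===== PORT A =====
-- while kpr[-1] != kpr[0]: kpr.append(perm[srtprm.index(kpr[-1])])   (fuel bounds the
-- iteration count only; under Pre_ the loop performs at most perm.length steps)
def awhileA (perm srtprm : List Int) : Nat → List Int → List Int
  | 0, kpr => kpr
  | Nat.succ fuel, kpr =>
    if PySem.List.pyGetD kpr (-1) 0 ≠ PySem.List.pyGetD kpr 0 0 then
      awhileA perm srtprm fuel
        (kpr ++ [perm.getD ((PySem.List.index? srtprm (PySem.List.pyGetD kpr (-1) 0)).getD 0) 0])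
    else kpr

def find_cyclicsubs (perm : List Int) : List (List Int) :=
  let srtprm := PySem.List.sorted perm (fun x => x) false
  let subkprms := srtprm.foldl (fun acc val =>
    if perm.getD ((PySem.List.index? srtprm val).getD 0) 0 = val then
      acc ++ [[val]]
    else
      let kpr := [val, perm.getD ((PySem.List.index? srtprm val).getD 0) 0]
      let kpr := awhileA perm srtprm perm.length kpr
      acc ++ [kpr.dropLast]) []
  PySem.Set.ofList subkprms

-- ===== PORT B =====
-- while nxt != v: cyc.append(nxt); nxt = perm[rank[nxt]]   (fuel bounds the iteration count
-- only; under Pre_ the loop performs at most perm.length steps)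
def bwhileB (perm : List Int) (rank : PySem.Dict Int Int) (v : Int) :
    Nat → List Int → Int → List Int
  | 0, cyc, _ => cyc
  | Nat.succ fuel, cyc, nxt =>
    if nxt ≠ v then
      bwhileB perm rank v fuel (cyc ++ [nxt]) (PySem.List.pyGetD perm (rank.getD nxt 0) 0)
    else cyc

def find_cyclicsubs_alt (perm : List Int) : List (List Int) :=
  let srtprm := PySem.List.sorted perm (fun x => x) false
  let rank := (PySem.List.enumerate srtprm 0).foldl
      (fun d p => if d.contains p.2 then d else d.insert p.2 p.1)
      (PySem.Dict.empty : PySem.Dict Int Int)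
  let st := srtprm.foldl (fun (st : PySem.Dict Int (List Int) × PySem.Set Int) v =>
      if PySem.Set.contains st.2 v then st
      else
        let cyc := bwhileB perm rank v perm.length [v] (PySem.List.pyGetD perm (rank.getD v 0) 0)
        (PySem.List.enumerate cyc 0).foldl
          (fun st2 p =>
            (st2.1.insert p.2
               (PySem.List.slice cyc (some p.1) none ++ PySem.List.slice cyc none (some p.1)),
             PySem.Set.add st2.2 p.2))
          st)
    ((PySem.Dict.empty : PySem.Dict Int (List Int)), (PySem.Set.empty : PySem.Set Int))
  let subkprms := srtprm.map (fun v => st.1.getD v [])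
  PySem.Set.ofList subkprms

-- ===== PRECONDITION & SPEC =====
-- the map each value of perm is sent through: v ↦ perm[sorted(perm).index(v)]
def pvStep (perm : List Int) (v : Int) : Int :=
  perm.getD ((PySem.List.index? (PySem.List.sorted perm (fun x => x) false) v).getD 0) 0

-- Pre_ excludes exactly the inputs on which A never returns: A's while loop (and B's)
-- terminates iff the map v ↦ perm[sorted(perm).index(v)] is injective on the values of perm
-- (otherwise some value is never stepped back to and the loop runs forever, e.g. perm = [1, 1, 0]).
def Pre_find_cyclicsubs (perm : List Int) : Prop :=
  ∀ a ∈ perm, ∀ b ∈ perm, pvStep perm a = pvStep perm b → a = b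
instance (perm : List Int) : Decidable (Pre_find_cyclicsubs perm) := by
  unfold Pre_find_cyclicsubs; infer_instance

def pvWitness_find_cyclicsubs : List Int := [2, 0, 1]

def Spec_find_cyclicsubs (perm : List Int) (out : List (List Int)) : Prop :=
  out = find_cyclicsubs_alt perm
instance (perm : List Int) (out : List (List Int)) : Decidable (Spec_find_cyclicsubs perm out) := by
  unfold Spec_find_cyclicsubs; infer_instance

-- ===== CLAIM (what is proved, stated in full; the proofs are below) =====
def Claim_equal_find_cyclicsubs : Prop := ∀ (perm : List Int), Dom_find_cyclicsubs perm →
  Pre_find_cyclicsubs perm → Spec_find_cyclicsubs perm (find_cyclicsubs perm)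

-- ===== LEMMAS AND PROOFS =====

def pvOrb (perm : List Int) (v : Int) (k : Nat) : List Int :=
  (List.range k).map (fun j => (pvStep perm)^[j] v)

noncomputable def pvPd (perm : List Int) (v : Int) : Nat :=
  letI : Decidable (∃ k, 0 < k ∧ (pvStep perm)^[k] v = v) := Classical.propDecidable _
  if h : ∃ k, 0 < k ∧ (pvStep perm)^[k] v = v then Nat.find h else 0

lemma pvStep_mem {perm : List Int} {v : Int} (hv : v ∈ perm) : pvStep perm v ∈ perm := by
  unfold pvStep
  have hm : v ∈ PySem.List.sorted perm (fun x => x) false :=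
    (PySem.List.mem_sorted _ _ _ _).2 hv
  have hs := (PySem.List.index?_isSome_iff
    (xs := PySem.List.sorted perm (fun x => x) false) (v := v)).2 hm
  obtain ⟨k, hk⟩ := Option.isSome_iff_exists.1 hs
  obtain ⟨hlt, -, -⟩ := PySem.List.getElem_of_index?_eq_some hk
  rw [hk]
  simp only [Option.getD_some]
  rw [PySem.List.length_sorted] at hlt
  rw [List.getD_eq_getElem _ _ hlt]
  exact List.getElem_mem _

lemma pvIter_mem {perm : List Int} {v : Int} (hv : v ∈ perm) (n : Nat) :
    (pvStep perm)^[n] v ∈ perm := by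
  induction n with
  | zero => simpa using hv
  | succ n ih => rw [Function.iterate_succ_apply']; exact pvStep_mem ih

lemma pvCancel {perm : List Int} (hpre : Pre_find_cyclicsubs perm) {a b : Int}
    (ha : a ∈ perm) (hb : b ∈ perm) (n : Nat)
    (h : (pvStep perm)^[n] a = (pvStep perm)^[n] b) : a = b := by
  induction n with
  | zero => simpa using h
  | succ n ih =>
      apply ih
      rw [Function.iterate_succ_apply', Function.iterate_succ_apply'] at h
      exact hpre _ (pvIter_mem ha n) _ (pvIter_mem hb n) h

lemma pvExists_ret {perm : List Int} (hpre : Pre_find_cyclicsubs perm) {v : Int}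
    (hv : v ∈ perm) : ∃ k, (0 < k ∧ (pvStep perm)^[k] v = v) ∧ k ≤ perm.length := by
  have hmaps : ∀ i ∈ Finset.range (perm.length + 1), (pvStep perm)^[i] v ∈ perm.toFinset := by
    intro i _; simpa using pvIter_mem hv i
  have hcard : perm.toFinset.card < (Finset.range (perm.length + 1)).card := by
    simp only [Finset.card_range]
    exact Nat.lt_succ_of_le (List.toFinset_card_le perm)
  obtain ⟨i, hi, j, hj, hne, heq⟩ :=
    Finset.exists_ne_map_eq_of_card_lt_of_maps_to hcard hmaps
  simp only [Finset.mem_range] at hi hj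
  -- wlog i < j
  rcases Nat.lt_or_ge i j with hlt | hge
  · have : (pvStep perm)^[i] v = (pvStep perm)^[i] ((pvStep perm)^[j - i] v) := by
      rw [← Function.iterate_add_apply]
      rw [heq]; congr 1; omega
    have := pvCancel hpre hv (pvIter_mem hv _) i this
    exact ⟨j - i, ⟨by omega, this.symm⟩, by omega⟩
  · have hlt : j < i := by omega
    have : (pvStep perm)^[j] v = (pvStep perm)^[j] ((pvStep perm)^[i - j] v) := by
      rw [← Function.iterate_add_apply]
      rw [← heq]; congr 1; omega
    have := pvCancel hpre hv (pvIter_mem hv _) j this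
    exact ⟨i - j, ⟨by omega, this.symm⟩, by omega⟩

lemma pvPd_spec {perm : List Int} (hpre : Pre_find_cyclicsubs perm) {v : Int} (hv : v ∈ perm) :
    (0 < pvPd perm v ∧ (pvStep perm)^[pvPd perm v] v = v ∧ pvPd perm v ≤ perm.length) ∧
    ∀ j, 0 < j → j < pvPd perm v → (pvStep perm)^[j] v ≠ v := by
  obtain ⟨k, hk, hkle⟩ := pvExists_ret hpre hv
  have hex : ∃ k, 0 < k ∧ (pvStep perm)^[k] v = v := ⟨k, hk⟩
  unfold pvPd
  rw [dif_pos hex]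
  refine ⟨⟨(Nat.find_spec hex).1, (Nat.find_spec hex).2, le_trans (Nat.find_le hk) hkle⟩, ?_⟩
  intro j hj hjlt hjv
  exact absurd ⟨hj, hjv⟩ (Nat.find_min hex hjlt)

lemma pvOrb_succ (perm : List Int) (v : Int) (m : Nat) :
    pvOrb perm v (m + 1) = pvOrb perm v m ++ [(pvStep perm)^[m] v] := by
  simp [pvOrb, List.range_succ]

lemma pvOrb_cons (perm : List Int) (v : Int) (m : Nat) :
    pvOrb perm v (m + 1) = v :: (List.range m).map (fun j => (pvStep perm)^[j + 1] v) := by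
  simp [pvOrb, List.range_succ_eq_map, Function.comp_def]

lemma pvStep_def' (perm : List Int) (x : Int) :
    perm.getD ((PySem.List.index? (PySem.List.sorted perm (fun x => x) false) x).getD 0) 0
      = pvStep perm x := rfl

lemma pvOrb_head (perm : List Int) (v : Int) {m : Nat} (hm : 1 ≤ m) (ys : List Int) :
    PySem.List.pyGetD (pvOrb perm v m ++ ys) 0 0 = v := by
  obtain ⟨m', rfl⟩ : ∃ m', m = m' + 1 := ⟨m - 1, by omega⟩
  rw [pvOrb_cons]
  simp [PySem.List.pyGetD_zero_cons]

lemma awhileA_run {perm : List Int} (hpre : Pre_find_cyclicsubs perm) {v : Int}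
    (hv : v ∈ perm) :
    ∀ fuel m, 1 ≤ m → m ≤ pvPd perm v → pvPd perm v - m ≤ fuel →
    awhileA perm (PySem.List.sorted perm (fun x => x) false) fuel
        (pvOrb perm v m ++ [(pvStep perm)^[m] v])
      = pvOrb perm v (pvPd perm v) ++ [v] := by
  intro fuel
  induction fuel with
  | zero =>
      intro m h1 h2 h3
      have hm : m = pvPd perm v := by omega
      subst hm
      rw [awhileA, (pvPd_spec hpre hv).1.2.1]
  | succ fuel ih =>
      intro m h1 h2 h3
      rw [awhileA]
      rw [PySem.List.pyGetD_neg_one_append_singleton, pvOrb_head perm v h1]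
      by_cases hm : m = pvPd perm v
      · subst hm
        rw [(pvPd_spec hpre hv).1.2.1]
        simp
      · have hmlt : m < pvPd perm v := by omega
        have hne : (pvStep perm)^[m] v ≠ v := (pvPd_spec hpre hv).2 m h1 hmlt
        rw [if_pos hne, pvStep_def']
        rw [List.append_assoc]
        have : [(pvStep perm)^[m] v] ++ [pvStep perm ((pvStep perm)^[m] v)]
            = [(pvStep perm)^[m] v] ++ [(pvStep perm)^[m+1] v] := by
          rw [Function.iterate_succ_apply']
        rw [this, ← List.append_assoc, ← pvOrb_succ]
        exact ih (m+1) (by omega) (by omega) (by omega)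

lemma pvPd_eq_one {perm : List Int} (hpre : Pre_find_cyclicsubs perm) {v : Int}
    (hv : v ∈ perm) (h : pvStep perm v = v) : pvPd perm v = 1 := by
  have hs := pvPd_spec hpre hv
  by_contra hne
  have h1 : (1:Nat) < pvPd perm v := by omega
  exact hs.2 1 (by omega) h1 (by simpa using h)

lemma A_value {perm : List Int} (hpre : Pre_find_cyclicsubs perm) :
    find_cyclicsubs perm = PySem.Set.ofList
      ((PySem.List.sorted perm (fun x => x) false).map
        (fun v => pvOrb perm v (pvPd perm v))) := by
  unfold find_cyclicsubs
  simp only []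
  congr 1
  have hbody : ∀ (acc : List (List Int)) (val : Int),
      val ∈ PySem.List.sorted perm (fun x => x) false →
      (fun (acc : List (List Int)) (val : Int) =>
        if perm.getD ((PySem.List.index? (PySem.List.sorted perm (fun x => x) false) val).getD 0) 0 = val then
          acc ++ [[val]]
        else
          acc ++ [(awhileA perm (PySem.List.sorted perm (fun x => x) false) perm.length
              [val, perm.getD ((PySem.List.index? (PySem.List.sorted perm (fun x => x) false) val).getD 0) 0]).dropLast]) acc val
      = (fun (acc : List (List Int)) (val : Int) => acc ++ [pvOrb perm val (pvPd perm val)]) acc val := by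
    intro acc val hval
    simp only []
    have hvp : val ∈ perm := (PySem.List.mem_sorted _ _ _ _).1 hval
    rw [pvStep_def']
    by_cases h : pvStep perm val = val
    · rw [if_pos h, pvPd_eq_one hpre hvp h]
      simp [pvOrb]
    · rw [if_neg h]
      have hinit : [val, pvStep perm val] = pvOrb perm val 1 ++ [(pvStep perm)^[1] val] := by
        simp [pvOrb]
      rw [hinit]
      have hs := pvPd_spec hpre hvp
      have h2 : 2 ≤ pvPd perm val := by
        rcases Nat.lt_or_ge (pvPd perm val) 2 with hl | hg
        · exfalso
          have : pvPd perm val = 1 := by omega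
          rw [this] at hs
          exact h (by simpa using hs.1.2.1)
        · exact hg
      rw [awhileA_run hpre hvp perm.length 1 (by omega) (by omega) (by omega)]
      rw [List.dropLast_concat]
  have h1 := PySem.List.foldl_congr_mem _ _ _ ([] : List (List Int)) hbody
  rw [h1, PySem.List.foldl_append_singleton_eq_map]
  simp

lemma rank_fold_get (xs : List Int) : ∀ (s : Int) (d : PySem.Dict Int Int) (v : Int),
    ((PySem.List.enumerate xs s).foldl
        (fun d p => if d.contains p.2 then d else d.insert p.2 p.1) d).get? v
      = if d.contains v then d.get? v
        else (PySem.List.index? xs v).map (fun n => s + (n : Int)) := by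
  induction xs with
  | nil =>
      intro s d v
      simp only [PySem.List.enumerate_nil, List.foldl_nil]
      by_cases hc : d.contains v
      · rw [if_pos hc]
      · rw [if_neg hc, (PySem.Dict.get?_eq_none_iff_contains d v).2 (by simpa using hc)]
        simp [PySem.List.index?_eq_idxOf?]
  | cons x xs ih =>
      intro s d v
      rw [PySem.List.enumerate_cons, List.foldl_cons]
      by_cases hvx : v = x
      · subst hvx
        by_cases hc : d.contains v
        · rw [if_pos hc, ih, if_pos hc, if_pos hc]
        · rw [if_neg hc, ih]
          have hc' : (d.insert v s).contains v := PySem.Dict.contains_insert_self d v s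
          rw [if_pos hc', if_neg hc, PySem.Dict.get?_insert_self,
            PySem.List.index?_cons_self]
          simp
      · have hxv : x ≠ v := fun h => hvx h.symm
        by_cases hc : d.contains x
        · rw [if_pos hc, ih, PySem.List.index?_cons_of_ne _ hxv]
          by_cases hcv : d.contains v
          · rw [if_pos hcv, if_pos hcv]
          · rw [if_neg hcv, if_neg hcv]
            cases PySem.List.index? xs v with
            | none => simp
            | some n => simp; ring
        · rw [if_neg hc, ih]
          have hcont : (d.insert x s).contains v = d.contains v := by
            rw [PySem.Dict.contains_insert]
            have : (v == x) = false := by simpa using hvx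
            rw [this]; simp
          rw [hcont, PySem.List.index?_cons_of_ne _ hxv]
          by_cases hcv : d.contains v
          · rw [if_pos hcv, if_pos hcv, PySem.Dict.get?_insert_of_ne d s hvx]
          · rw [if_neg hcv, if_neg hcv]
            cases PySem.List.index? xs v with
            | none => simp
            | some n => simp; ring

def rankFold (perm : List Int) : PySem.Dict Int Int :=
  (PySem.List.enumerate (PySem.List.sorted perm (fun x => x) false) 0).foldl
    (fun d p => if d.contains p.2 then d else d.insert p.2 p.1)
    (PySem.Dict.empty : PySem.Dict Int Int)

lemma rank_step {perm : List Int} {v : Int} (hv : v ∈ perm) :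
    PySem.List.pyGetD perm ((rankFold perm).getD v 0) 0 = pvStep perm v := by
  have hm : v ∈ PySem.List.sorted perm (fun x => x) false :=
    (PySem.List.mem_sorted _ _ _ _).2 hv
  obtain ⟨k, hk⟩ := Option.isSome_iff_exists.1
    ((PySem.List.index?_isSome_iff (xs := PySem.List.sorted perm (fun x => x) false) (v := v)).2 hm)
  rw [rankFold, PySem.Dict.getD_eq_get?_getD, rank_fold_get]
  rw [if_neg (by simp [PySem.Dict.contains_empty])]
  show PySem.List.pyGetD perm ((((PySem.List.index? (PySem.List.sorted perm (fun x => x) false) v).map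
      (fun n => (0:Int) + (n : Int)))).getD 0) 0 = pvStep perm v
  rw [hk]
  simp only [Option.bind_some, Option.bind_eq_bind, Option.pure_def, Option.map_some,
    Option.getD_some, zero_add]
  rw [PySem.List.pyGetD_natCast]
  unfold pvStep
  rw [hk, Option.getD_some]

lemma bwhileB_run {perm : List Int} (hpre : Pre_find_cyclicsubs perm) {v : Int}
    (hv : v ∈ perm) :
    ∀ fuel m, 1 ≤ m → m ≤ pvPd perm v → pvPd perm v - m ≤ fuel →
    bwhileB perm (rankFold perm) v fuel (pvOrb perm v m) ((pvStep perm)^[m] v)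
      = pvOrb perm v (pvPd perm v) := by
  intro fuel
  induction fuel with
  | zero =>
      intro m h1 h2 h3
      have hm : m = pvPd perm v := by omega
      subst hm
      rw [bwhileB]
  | succ fuel ih =>
      intro m h1 h2 h3
      rw [bwhileB]
      by_cases hm : m = pvPd perm v
      · subst hm
        rw [(pvPd_spec hpre hv).1.2.1]
        simp
      · have hmlt : m < pvPd perm v := by omega
        have hne : (pvStep perm)^[m] v ≠ v := (pvPd_spec hpre hv).2 m h1 hmlt
        rw [if_pos hne]
        rw [rank_step (pvIter_mem hv m), ← Function.iterate_succ_apply' (pvStep perm) m v, ← pvOrb_succ]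
        exact ih (m+1) (by omega) (by omega) (by omega)

lemma pvOrb_length (perm : List Int) (v : Int) (k : Nat) : (pvOrb perm v k).length = k := by
  simp [pvOrb]

lemma pvOrb_getElem (perm : List Int) (v : Int) {k i : Nat} (h : i < k) :
    (pvOrb perm v k)[i]'(by rw [pvOrb_length]; exact h) = (pvStep perm)^[i] v := by
  simp [pvOrb]

lemma pvPd_shift {perm : List Int} (hpre : Pre_find_cyclicsubs perm) {v : Int}
    (hv : v ∈ perm) (j : Nat) : pvPd perm ((pvStep perm)^[j] v) = pvPd perm v := by
  have hs := pvPd_spec hpre hv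
  have hc : v ∈ perm := hv
  have hcj : (pvStep perm)^[j] v ∈ perm := pvIter_mem hv j
  have hret : (pvStep perm)^[pvPd perm v] ((pvStep perm)^[j] v) = (pvStep perm)^[j] v := by
    rw [← Function.iterate_add_apply, Nat.add_comm, Function.iterate_add_apply, hs.1.2.1]
  have hsj := pvPd_spec hpre hcj
  -- pd of shifted is ≤ pd v and ≥: show equal by minimality both ways
  rcases Nat.lt_trichotomy (pvPd perm ((pvStep perm)^[j] v)) (pvPd perm v) with h | h | h
  · exfalso
    set k' := pvPd perm ((pvStep perm)^[j] v) with hk'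
    have hk'pos : 0 < k' := hsj.1.1
    have : (pvStep perm)^[k'] ((pvStep perm)^[j] v) = (pvStep perm)^[j] v := hsj.1.2.1
    rw [← Function.iterate_add_apply, Nat.add_comm, Function.iterate_add_apply] at this
    have := pvCancel hpre (pvIter_mem hv k') hv j this
    exact hs.2 k' hk'pos h this
  · exact h
  · exfalso
    exact hsj.2 (pvPd perm v) hs.1.1 h hret

lemma pvOrb_rotate {perm : List Int} (hpre : Pre_find_cyclicsubs perm) {v : Int}
    (hv : v ∈ perm) {j : Nat} (hj : j ≤ pvPd perm v) :
    pvOrb perm ((pvStep perm)^[j] v) (pvPd perm v)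
      = (pvOrb perm v (pvPd perm v)).drop j ++ (pvOrb perm v (pvPd perm v)).take j := by
  set k := pvPd perm v with hk
  have hret : (pvStep perm)^[k] v = v := (pvPd_spec hpre hv).1.2.1
  apply List.ext_getElem
  · simp [pvOrb_length]; omega
  · intro i hi1 hi2
    rw [pvOrb_length] at hi1
    rw [pvOrb_getElem perm _ hi1]
    rw [← Function.iterate_add_apply]
    by_cases hcase : i < k - j
    · rw [List.getElem_append_left (by simp [pvOrb_length]; omega)]
      rw [List.getElem_drop]
      have : (pvOrb perm v k)[j + i]'(by rw [pvOrb_length]; omega) = (pvStep perm)^[j + i] v :=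
        pvOrb_getElem perm v (by omega)
      rw [this, Nat.add_comm]
    · rw [List.getElem_append_right (by simp [pvOrb_length]; omega)]
      simp only [List.length_drop, pvOrb_length]
      rw [List.getElem_take]
      have hlt : i - (k - j) < k := by omega
      have : (pvOrb perm v k)[i - (k - j)]'(by rw [pvOrb_length]; omega)
          = (pvStep perm)^[i - (k - j)] v := pvOrb_getElem perm v hlt
      rw [this]
      have : i + j = (i - (k - j)) + k := by omega
      rw [this, Function.iterate_add_apply, hret]

noncomputable def pvG (perm : List Int) (v : Int) : List Int := pvOrb perm v (pvPd perm v)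

lemma inner_fold (perm : List Int) (valf : Int × Int → List Int) :
    ∀ (L : List (Int × Int)), (∀ p ∈ L, valf p = pvG perm p.2 ∧ p.2 ∈ perm) →
    ∀ (rot : PySem.Dict Int (List Int)) (vis : PySem.Set Int),
    (∀ c ∈ vis, rot.getD c [] = pvG perm c ∧ c ∈ perm) →
    (∀ c ∈ (L.foldl (fun st2 p => (st2.1.insert p.2 (valf p), PySem.Set.add st2.2 p.2))
        (rot, vis)).2,
      (L.foldl (fun st2 p => (st2.1.insert p.2 (valf p), PySem.Set.add st2.2 p.2))
        (rot, vis)).1.getD c [] = pvG perm c ∧ c ∈ perm)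
    ∧ (∀ c ∈ vis, c ∈ (L.foldl (fun st2 p => (st2.1.insert p.2 (valf p), PySem.Set.add st2.2 p.2))
        (rot, vis)).2)
    ∧ (∀ p ∈ L, p.2 ∈ (L.foldl (fun st2 p => (st2.1.insert p.2 (valf p), PySem.Set.add st2.2 p.2))
        (rot, vis)).2) := by
  intro L
  induction L with
  | nil =>
      intro _ rot vis hinv
      refine ⟨hinv, fun c hc => hc, by simp⟩
  | cons p L ih =>
      intro hL rot vis hinv
      rw [List.foldl_cons]
      have hp := hL p (by simp)
      have hinv' : ∀ c ∈ PySem.Set.add vis p.2,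
          (rot.insert p.2 (valf p)).getD c [] = pvG perm c ∧ c ∈ perm := by
        intro c hc
        rcases (PySem.Set.mem_add vis p.2 c).1 hc with hcv | hcp
        · rw [PySem.Dict.getD_insert]
          by_cases hce : c = p.2
          · rw [if_pos hce, hp.1, hce]
            exact ⟨rfl, hp.2⟩
          · rw [if_neg hce]
            exact hinv c hcv
        · subst hcp
          rw [PySem.Dict.getD_insert, if_pos rfl, hp.1]
          exact ⟨rfl, hp.2⟩
      obtain ⟨h1, h2, h3⟩ := ih (fun q hq => hL q (by simp [hq])) _ _ hinv'
      refine ⟨h1, ?_, ?_⟩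
      · intro c hc
        exact h2 c ((PySem.Set.mem_add vis p.2 c).2 (Or.inl hc))
      · intro q hq
        rcases List.mem_cons.1 hq with rfl | hq'
        · exact h2 q.2 ((PySem.Set.mem_add vis q.2 q.2).2 (Or.inr rfl))
        · exact h3 q hq'

lemma outer_fold {perm : List Int} (hpre : Pre_find_cyclicsubs perm) :
    ∀ (l : List Int), (∀ x ∈ l, x ∈ perm) →
    ∀ (rot : PySem.Dict Int (List Int)) (vis : PySem.Set Int),
    (∀ c ∈ vis, rot.getD c [] = pvG perm c ∧ c ∈ perm) →
    (∀ c ∈ (l.foldl (fun (st : PySem.Dict Int (List Int) × PySem.Set Int) v =>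
        if PySem.Set.contains st.2 v then st
        else
          (PySem.List.enumerate (bwhileB perm (rankFold perm) v perm.length [v]
              (PySem.List.pyGetD perm ((rankFold perm).getD v 0) 0)) 0).foldl
            (fun st2 p => (st2.1.insert p.2
                (PySem.List.slice (bwhileB perm (rankFold perm) v perm.length [v]
                    (PySem.List.pyGetD perm ((rankFold perm).getD v 0) 0)) (some p.1) none
                 ++ PySem.List.slice (bwhileB perm (rankFold perm) v perm.length [v]
                    (PySem.List.pyGetD perm ((rankFold perm).getD v 0) 0)) none (some p.1)),
               PySem.Set.add st2.2 p.2)) st) (rot, vis)).2,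
      (l.foldl (fun (st : PySem.Dict Int (List Int) × PySem.Set Int) v =>
        if PySem.Set.contains st.2 v then st
        else
          (PySem.List.enumerate (bwhileB perm (rankFold perm) v perm.length [v]
              (PySem.List.pyGetD perm ((rankFold perm).getD v 0) 0)) 0).foldl
            (fun st2 p => (st2.1.insert p.2
                (PySem.List.slice (bwhileB perm (rankFold perm) v perm.length [v]
                    (PySem.List.pyGetD perm ((rankFold perm).getD v 0) 0)) (some p.1) none
                 ++ PySem.List.slice (bwhileB perm (rankFold perm) v perm.length [v]
                    (PySem.List.pyGetD perm ((rankFold perm).getD v 0) 0)) none (some p.1)),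
               PySem.Set.add st2.2 p.2)) st) (rot, vis)).1.getD c [] = pvG perm c ∧ c ∈ perm)
    ∧ (∀ c ∈ vis, c ∈ (l.foldl (fun (st : PySem.Dict Int (List Int) × PySem.Set Int) v =>
        if PySem.Set.contains st.2 v then st
        else
          (PySem.List.enumerate (bwhileB perm (rankFold perm) v perm.length [v]
              (PySem.List.pyGetD perm ((rankFold perm).getD v 0) 0)) 0).foldl
            (fun st2 p => (st2.1.insert p.2
                (PySem.List.slice (bwhileB perm (rankFold perm) v perm.length [v]
                    (PySem.List.pyGetD perm ((rankFold perm).getD v 0) 0)) (some p.1) none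
                 ++ PySem.List.slice (bwhileB perm (rankFold perm) v perm.length [v]
                    (PySem.List.pyGetD perm ((rankFold perm).getD v 0) 0)) none (some p.1)),
               PySem.Set.add st2.2 p.2)) st) (rot, vis)).2)
    ∧ (∀ x ∈ l, x ∈ (l.foldl (fun (st : PySem.Dict Int (List Int) × PySem.Set Int) v =>
        if PySem.Set.contains st.2 v then st
        else
          (PySem.List.enumerate (bwhileB perm (rankFold perm) v perm.length [v]
              (PySem.List.pyGetD perm ((rankFold perm).getD v 0) 0)) 0).foldl
            (fun st2 p => (st2.1.insert p.2
                (PySem.List.slice (bwhileB perm (rankFold perm) v perm.length [v]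
                    (PySem.List.pyGetD perm ((rankFold perm).getD v 0) 0)) (some p.1) none
                 ++ PySem.List.slice (bwhileB perm (rankFold perm) v perm.length [v]
                    (PySem.List.pyGetD perm ((rankFold perm).getD v 0) 0)) none (some p.1)),
               PySem.Set.add st2.2 p.2)) st) (rot, vis)).2) := by
  intro l
  induction l with
  | nil =>
      intro _ rot vis hinv
      exact ⟨hinv, fun c hc => hc, by simp⟩
  | cons v l ih =>
      intro hl rot vis hinv
      have hvp : v ∈ perm := hl v (by simp)
      rw [List.foldl_cons]
      by_cases hc : PySem.Set.contains vis v
      · rw [if_pos hc]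
        obtain ⟨h1, h2, h3⟩ := ih (fun x hx => hl x (by simp [hx])) rot vis hinv
        refine ⟨h1, h2, ?_⟩
        intro x hx
        rcases List.mem_cons.1 hx with rfl | hx'
        · exact h2 x ((PySem.Set.contains_iff vis x).1 hc)
        · exact h3 x hx'
      · rw [if_neg hc]
        have hs := pvPd_spec hpre hvp
        have hcyc : bwhileB perm (rankFold perm) v perm.length [v]
            (PySem.List.pyGetD perm ((rankFold perm).getD v 0) 0) = pvG perm v := by
          have h1 : ([v] : List Int) = pvOrb perm v 1 := by simp [pvOrb]
          have h2 : PySem.List.pyGetD perm ((rankFold perm).getD v 0) 0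
              = (pvStep perm)^[1] v := by
            rw [rank_step hvp]; simp
          rw [h1, h2]; unfold pvG
          exact bwhileB_run hpre hvp perm.length 1 (by omega) (by omega) (by omega)
        rw [hcyc]
        have hval : ∀ p ∈ PySem.List.enumerate (pvG perm v) 0,
            (fun (p : Int × Int) =>
              PySem.List.slice (pvG perm v) (some p.1) none
                ++ PySem.List.slice (pvG perm v) none (some p.1)) p = pvG perm p.2
              ∧ p.2 ∈ perm := by
          intro p hp
          obtain ⟨k, hk, rfl⟩ := (PySem.List.mem_enumerate_iff _ _ _).1 hp
          have hklen : k < pvPd perm v := by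
            unfold pvG at hk; rw [pvOrb_length] at hk; exact hk
          have hgk : (pvG perm v)[k] = (pvStep perm)^[k] v := by
            unfold pvG; exact pvOrb_getElem perm v hklen
          constructor
          · simp only [zero_add, PySem.List.slice_from_natCast, PySem.List.slice_to_natCast]
            rw [hgk]
            unfold pvG
            rw [pvPd_shift hpre hvp k, pvOrb_rotate hpre hvp (by omega)]
          · rw [hgk]; exact pvIter_mem hvp k
        obtain ⟨h1, h2, h3⟩ := inner_fold perm _ _ hval rot vis hinv
        obtain ⟨g1, g2, g3⟩ := ih (fun x hx => hl x (by simp [hx])) _ _ h1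
        refine ⟨g1, fun c hcv => g2 c (h2 c hcv), ?_⟩
        intro x hx
        rcases List.mem_cons.1 hx with rfl | hx'
        · apply g2
          have h0 : ((0 : Int), x) ∈ PySem.List.enumerate (pvG perm x) 0 := by
            rw [PySem.List.mem_enumerate_iff]
            refine ⟨0, by unfold pvG; rw [pvOrb_length]; exact hs.1.1, ?_⟩
            unfold pvG
            have := pvOrb_getElem perm x (k := pvPd perm x) (i := 0) hs.1.1
            simp only [Function.iterate_zero, id] at this
            simp [this]
          have := h3 _ h0
          simpa using this
        · exact g3 x hx'

lemma B_value {perm : List Int} (hpre : Pre_find_cyclicsubs perm) :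
    find_cyclicsubs_alt perm = PySem.Set.ofList
      ((PySem.List.sorted perm (fun x => x) false).map (pvG perm)) := by
  rw [show find_cyclicsubs_alt perm = PySem.Set.ofList
      ((PySem.List.sorted perm (fun x => x) false).map (fun v =>
        ((PySem.List.sorted perm (fun x => x) false).foldl
          (fun (st : PySem.Dict Int (List Int) × PySem.Set Int) v =>
            if PySem.Set.contains st.2 v then st
            else
              (PySem.List.enumerate (bwhileB perm (rankFold perm) v perm.length [v]
                  (PySem.List.pyGetD perm ((rankFold perm).getD v 0) 0)) 0).foldl
                (fun st2 p => (st2.1.insert p.2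
                    (PySem.List.slice (bwhileB perm (rankFold perm) v perm.length [v]
                        (PySem.List.pyGetD perm ((rankFold perm).getD v 0) 0)) (some p.1) none
                     ++ PySem.List.slice (bwhileB perm (rankFold perm) v perm.length [v]
                        (PySem.List.pyGetD perm ((rankFold perm).getD v 0) 0)) none (some p.1)),
                   PySem.Set.add st2.2 p.2)) st)
          ((PySem.Dict.empty : PySem.Dict Int (List Int)), (PySem.Set.empty : PySem.Set Int))).1.getD v []))
    from rfl]
  congr 1
  apply List.map_congr_left
  intro v hv
  obtain ⟨h1, h2, h3⟩ := outer_fold hpre (PySem.List.sorted perm (fun x => x) false)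
    (fun x hx => (PySem.List.mem_sorted _ _ _ _).1 hx)
    (PySem.Dict.empty : PySem.Dict Int (List Int)) (PySem.Set.empty : PySem.Set Int)
    (by intro c hc; simp [PySem.Set.empty] at hc)
  exact (h1 v (h3 v hv)).1

-- ===== VERDICT (by name: the statement is the Claim_ definition above) =====
theorem find_cyclicsubs_spec : Claim_equal_find_cyclicsubs := by
  intro perm _ hpre
  unfold Spec_find_cyclicsubs
  rw [A_value hpre, B_value hpre]
  rfl
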